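-- pv_equiv track=rewrite | github.com/JOOCHANN/Programmers_algorithm | level1/New_ID_recommendation.py | solution
-- ===== SOURCE A (Python) =====
-- def solution(new_id):
--     special = ['-', '_', '.']
--     answer = ''
--     new_id = new_id.lower()
--     new_id = ''.join(c for c in new_id if c.isalnum() or c in special)
--     new_id = ''.join('.'+d for d in new_id.split('.') if d != '')
--     new_id = new_id.strip('.')
--     if not(new_id) : new_id = "a"
--     new_id = new_id[:15]
--     new_id = new_id.rstrip('.')
--     if len(new_id) == 1:
--         new_id = new_id + new_id[-1] + new_id[-1]
--     if len(new_id) == 2: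
--         new_id = new_id + new_id[-1]
--
--     answer = new_id
--     return answer
-- ===== SOURCE B (Python) =====
-- def solution(new_id):
--     out = []
--     for ch in new_id:
--         c = ch.lower()
--         if c.isalnum() or c == '-' or c == '_':
--             out.append(c)
--         elif c == '.':
--             if out and out[-1] != '.':
--                 out.append('.')
--     s = ''.join(out).rstrip('.')
--     if not s:
--         s = 'a'
--     s = s[:15].rstrip('.')
--     if len(s) == 1:
--         s = s + s + s
--     elif len(s) == 2:
--         s = s + s[-1]
--     return s
-- ===== Notes on version B (the rewrite author's own statement) =====
-- stated objective: alternative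
-- what changed: Replaces A's six sequential string passes (lower, filter-join, split('.')/join dot-rebuild, strip('.')) by one fused stateful loop that lowercases, filters and collapses/drops dots in a single traversal, followed by a trailing-dot rstrip; the empty/truncate/pad tail is kept.
import Mathlib
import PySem

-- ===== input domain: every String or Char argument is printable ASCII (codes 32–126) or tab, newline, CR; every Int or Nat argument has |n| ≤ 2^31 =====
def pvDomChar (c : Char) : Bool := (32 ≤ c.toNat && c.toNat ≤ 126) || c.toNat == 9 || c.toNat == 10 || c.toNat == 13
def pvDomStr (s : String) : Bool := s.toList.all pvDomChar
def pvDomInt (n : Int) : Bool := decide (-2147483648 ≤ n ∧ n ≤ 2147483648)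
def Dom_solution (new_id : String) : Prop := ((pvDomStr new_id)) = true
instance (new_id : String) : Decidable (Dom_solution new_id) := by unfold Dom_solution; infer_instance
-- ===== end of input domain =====

-- B replaces A's six sequential string passes (lower, filter-join, split('.')/dot-join, strip('.'))
-- by one fused stateful loop that lowercases, filters and collapses/drops dots in a single traversal
-- (then rstrips trailing dots); the empty/truncate/pad tail logic is unchanged. Objective: alternative.

-- exact port of Python's s.rstrip('.') (right-strip all '.'), used by both ports
def rstripDot (s : List Char) : List Char := (s.reverse.dropWhile (fun c => c == '.')).reverse

-- ===== PORT A =====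
def solution (new_id : String) : String :=
  let s1 := PySem.Chars.lower new_id.toList
  let s2 := s1.filter (fun c => PySem.Chars.isalnum c || ['-','_','.'].contains c)
  let s3 := PySem.Chars.join [] (((PySem.Chars.splitOn s2 ['.']).filter (fun d => d ≠ [])).map (fun d => '.' :: d))
  let s4 := PySem.Chars.stripChars s3 ['.']
  let s5 := if s4 = [] then ['a'] else s4
  let s6 := PySem.List.slice s5 none (some 15)
  let s7 := rstripDot s6
  -- new_id[-1]: in range by the length guard, so the pyGetD default is unreachable
  let s8 := if s7.length = 1 then s7 ++ [PySem.List.pyGetD s7 (-1) 'a'] ++ [PySem.List.pyGetD s7 (-1) 'a'] else s7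
  let s9 := if s8.length = 2 then s8 ++ [PySem.List.pyGetD s8 (-1) 'a'] else s8
  String.ofList s9

-- ===== PORT B =====
def solution_alt (new_id : String) : String :=
  let core := new_id.toList.foldl (fun acc ch =>
      let c := PySem.Chars.lowerChar ch
      if PySem.Chars.isalnum c || c = '-' || c = '_' then acc ++ [c]
      else if c = '.' then
        if acc ≠ [] ∧ acc.getLast? ≠ some '.' then acc ++ ['.'] else acc
      else acc) []
  let t1 := rstripDot core
  let t2 := if t1 = [] then ['a'] else t1
  let t3 := PySem.List.slice t2 none (some 15)
  let t4 := rstripDot t3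
  -- s[-1]: in range by the length guard, so the pyGetD default is unreachable
  let t5 := if t4.length = 1 then t4 ++ t4 ++ t4
            else if t4.length = 2 then t4 ++ [PySem.List.pyGetD t4 (-1) 'a'] else t4
  String.ofList t5

-- ===== PRECONDITION & SPEC =====
def Spec_solution (new_id : String) (out : String) : Prop := out = solution_alt new_id
instance (new_id : String) (out : String) : Decidable (Spec_solution new_id out) := by unfold Spec_solution; infer_instance

-- ===== CLAIM (what is proved, stated in full; the proofs are below) =====
def Claim_equal_solution : Prop := ∀ (new_id : String), Dom_solution new_id → Spec_solution new_id (solution new_id)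

-- ===== LEMMAS AND PROOFS =====

def mySplit : List Char → List Char × List (List Char)
  | [] => ([], [])
  | c :: t => if c = '.' then ([], (mySplit t).1 :: (mySplit t).2)
              else (c :: (mySplit t).1, (mySplit t).2)

theorem splitOn_go_eq (fuel : Nat) (l cur : List Char) (acc : List (List Char))
    (h : l.length < fuel) :
    PySem.Chars.splitOn.go ['.'] fuel l cur acc =
      acc.reverse ++ (((mySplit l).1 :: (mySplit l).2).modifyHead (cur.reverse ++ ·)) := by
  induction fuel generalizing l cur acc with
  | zero => omega
  | succ fuel ih =>
    cases l with
    | nil => simp [PySem.Chars.splitOn.go, mySplit]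
    | cons c rest =>
      by_cases hc : c = '.'
      · subst hc
        rw [PySem.Chars.splitOn.go]
        rw [if_pos (by simp)]
        simp only [List.length_cons, List.length_nil, List.drop_succ_cons, List.drop_zero]
        rw [ih rest [] (cur.reverse :: acc) (by simpa using Nat.lt_of_succ_lt_succ h)]
        simp [mySplit]
      · rw [PySem.Chars.splitOn.go]
        rw [if_neg (by simp [List.isPrefixOf]; exact fun h => absurd h.symm hc)]
        rw [ih rest (c :: cur) acc (by simpa using Nat.lt_of_succ_lt_succ h)]
        simp [mySplit, hc]

theorem splitOn_eq (l : List Char) :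
    PySem.Chars.splitOn l ['.'] = (mySplit l).1 :: (mySplit l).2 := by
  rw [PySem.Chars.splitOn, splitOn_go_eq _ _ _ _ (by omega)]
  cases h2 : (mySplit l).1 <;> simp [List.modifyHead]

def dotflat (ps : List (List Char)) : List Char := (ps.map (fun p => '.' :: p)).flatten

def partsOf (t : List Char) : List (List Char) :=
  ((mySplit t).1 :: (mySplit t).2).filter (fun d => d ≠ [])

def NC (t : List Char) : List Char := List.intercalate ['.'] (partsOf t)

def Dfa : Bool → List Char → List Char
  | _, [] => []
  | b, c :: t => if c = '.' then (if b then '.' :: Dfa false t else Dfa false t) else c :: Dfa true t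

theorem intercalate_cons_dotflat (p : List Char) (ps : List (List Char)) :
    List.intercalate ['.'] (p :: ps) = p ++ dotflat ps := by
  induction ps generalizing p with
  | nil => simp [dotflat, List.intercalate]
  | cons q qs ih =>
    have h2 : List.intercalate ['.'] (p::q::qs) = p ++ ['.'] ++ List.intercalate ['.'] (q::qs) := by
      simp [List.intercalate, List.intersperse]
    rw [h2, ih q]; simp [dotflat]

theorem dotflat_eq (ps : List (List Char)) :
    dotflat ps = if ps = [] then [] else '.' :: List.intercalate ['.'] ps := by
  cases ps with
  | nil => simp [dotflat]
  | cons p qs => simp [intercalate_cons_dotflat, dotflat]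

theorem mySplit_no_dot (t : List Char) :
    ∀ p ∈ (mySplit t).1 :: (mySplit t).2, '.' ∉ p := by
  induction t with
  | nil => simp [mySplit]
  | cons c t ih =>
    by_cases hc : c = '.'
    · subst hc; simpa [mySplit] using ih
    · intro p hp
      simp only [mySplit, if_neg hc, List.mem_cons] at hp
      rcases hp with hp | hp
      · subst hp
        intro hmem
        rcases List.mem_cons.mp hmem with h | h
        · exact hc h.symm
        · exact (ih _ (by simp)) h
      · exact ih p (by simp [hp])

theorem partsOf_prop (t : List Char) : ∀ p ∈ partsOf t, p ≠ [] ∧ '.' ∉ p := by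
  intro p hp
  simp only [partsOf, List.mem_filter, decide_eq_true_eq] at hp
  exact ⟨hp.2, mySplit_no_dot t p hp.1⟩

theorem intercalate_ne_nil (ps : List (List Char)) (h : ps ≠ []) (h2 : ∀ p ∈ ps, p ≠ []) :
    List.intercalate ['.'] ps ≠ [] := by
  cases ps with
  | nil => exact absurd rfl h
  | cons p qs =>
    rw [intercalate_cons_dotflat]
    intro hcon
    exact h2 p (by simp) (by simpa using (List.append_eq_nil_iff.mp hcon).1)

theorem intercalate_last (ps : List (List Char)) (h2 : ∀ p ∈ ps, p ≠ [] ∧ '.' ∉ p) :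
    (List.intercalate ['.'] ps).getLast? ≠ some '.' := by
  induction ps with
  | nil => simp [List.intercalate]
  | cons p qs ih =>
    cases qs with
    | nil =>
      have hs : List.intercalate ['.'] [p] = p := by simp [List.intercalate]
      rw [hs]
      intro hcon
      exact (h2 p (by simp)).2 (List.mem_of_getLast? hcon)
    | cons q qs' =>
      have h3 : List.intercalate ['.'] (p::q::qs') = p ++ (['.'] ++ List.intercalate ['.'] (q::qs')) := by
        rw [intercalate_cons_dotflat, dotflat_eq]; simp
      rw [h3, List.getLast?_append, List.getLast?_append]
      have hne : List.intercalate ['.'] (q::qs') ≠ [] :=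
        intercalate_ne_nil _ (by simp) (fun r hr => (h2 r (by simp [hr])).1)
      have ihq := ih (fun r hr => h2 r (by simp [hr]))
      cases hv : (List.intercalate ['.'] (q::qs')).getLast? with
      | none => exact absurd (by simpa using hv) hne
      | some v =>
        rw [hv] at ihq
        simpa using fun h => ihq (by rw [h])

def padT (t : List Char) : List Char := if t.getLast? = some '.' then ['.'] else []
def padF (t : List Char) : List Char := if NC t ≠ [] ∧ t.getLast? = some '.' then ['.'] else []

theorem getLast?_cons_ne_nil (c : Char) (t : List Char) (h : t ≠ []) :
    (c :: t).getLast? = t.getLast? := by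
  cases t with
  | nil => exact absurd rfl h
  | cons x xs => exact List.getLast?_cons_cons

theorem partsOf_cons_dot (t : List Char) : partsOf ('.' :: t) = partsOf t := by
  simp [partsOf, mySplit]

theorem partsOf_cons_char (c : Char) (t : List Char) (hc : c ≠ '.') :
    partsOf (c :: t) = (c :: (mySplit t).1) :: (mySplit t).2.filter (fun d => d ≠ []) := by
  simp [partsOf, mySplit, hc]

theorem partsOf_nil_all_dot (t : List Char) (h : partsOf t = []) : ∀ c ∈ t, c = '.' := by
  induction t with
  | nil => simp
  | cons c t ih =>
    by_cases hc : c = '.'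
    · subst hc
      rw [partsOf_cons_dot] at h
      simpa using ih h
    · rw [partsOf_cons_char c t hc] at h
      simp at h

theorem partsOf_nil_last (t : List Char) (h : partsOf t = []) (ht : t ≠ []) :
    t.getLast? = some '.' := by
  cases hv : t.getLast? with
  | none => exact absurd (by simpa using hv) ht
  | some v => rw [partsOf_nil_all_dot t h v (List.mem_of_getLast? hv)]

theorem NC_last (t : List Char) : (NC t).getLast? ≠ some '.' :=
  intercalate_last _ (partsOf_prop t)

theorem NC_nil : NC [] = [] := by simp [NC, partsOf, mySplit, List.intercalate]

theorem NC_ne_nil_t_ne (t : List Char) (h : NC t ≠ []) : t ≠ [] := by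
  intro ht; subst ht; exact h NC_nil

theorem NC_ne_nil_parts_ne (t : List Char) (h : partsOf t ≠ []) : NC t ≠ [] :=
  intercalate_ne_nil _ h (fun p hp => (partsOf_prop t p hp).1)

theorem Dfa_spec (t : List Char) :
    Dfa true t = (mySplit t).1 ++ dotflat ((mySplit t).2.filter (fun d => d ≠ [])) ++ padT t
  ∧ Dfa false t = NC t ++ padF t := by
  induction t with
  | nil => simp [Dfa, padT, padF, NC_nil, mySplit, dotflat]
  | cons c t ih =>
    obtain ⟨ihT, ihF⟩ := ih
    by_cases hc : c = '.'
    · subst hc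
      have hsplit : mySplit ('.' :: t) = ([], (mySplit t).1 :: (mySplit t).2) := by
        simp [mySplit]
      have hfilter : ((mySplit t).1 :: (mySplit t).2).filter (fun d => d ≠ []) = partsOf t := rfl
      constructor
      · -- Dfa true ('.'::t)
        rw [show Dfa true ('.'::t) = '.' :: Dfa false t from by simp [Dfa], ihF, hsplit]
        simp only [List.nil_append, hfilter]
        by_cases hP : partsOf t = []
        · have hN : NC t = [] := by simp [NC, hP, List.intercalate]
          simp only [hN, padF, hP, dotflat]
          by_cases ht : t = []
          · subst ht; simp [padT]
          · simp [padT, getLast?_cons_ne_nil _ _ ht, partsOf_nil_last t hP ht]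
        · have hN : NC t ≠ [] := NC_ne_nil_parts_ne t hP
          rw [dotflat_eq, if_neg hP]
          have ht : t ≠ [] := NC_ne_nil_t_ne t hN
          have h5 : NC t = List.intercalate ['.'] (partsOf t) := rfl
          rw [← h5]
          have hpp : padF t = padT ('.'::t) := by
            simp [padF, padT, hN, getLast?_cons_ne_nil _ _ ht]
          rw [hpp]; simp
      · -- Dfa false ('.'::t)
        rw [show Dfa false ('.'::t) = Dfa false t from by simp [Dfa], ihF]
        have hNC : NC ('.'::t) = NC t := by simp [NC, partsOf_cons_dot]
        rw [hNC]
        by_cases hN : NC t = []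
        · simp [padF, hN, hNC]
        · have ht : t ≠ [] := NC_ne_nil_t_ne t hN
          have hpp : padF ('.'::t) = padF t := by
            simp [padF, hNC, getLast?_cons_ne_nil _ _ ht]
          rw [hpp]
    · have hsplit : mySplit (c :: t) = (c :: (mySplit t).1, (mySplit t).2) := by
        simp [mySplit, hc]
      have hpadT : padT (c :: t) = padT t := by
        cases t with
        | nil => simp [padT, hc]
        | cons x xs => simp [padT, List.getLast?_cons_cons]
      constructor
      · rw [show Dfa true (c::t) = c :: Dfa true t from by simp [Dfa, hc], ihT, hsplit, hpadT]
        simp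
      · rw [show Dfa false (c::t) = c :: Dfa true t from by simp [Dfa, hc], ihT]
        have hNC : NC (c::t) = (c :: (mySplit t).1) ++ dotflat ((mySplit t).2.filter (fun d => d ≠ [])) := by
          rw [NC, partsOf_cons_char c t hc, intercalate_cons_dotflat]
        rw [hNC]
        have hpadF : padF (c::t) = padT t := by
          rw [padF, hNC, hpadT.symm, padT]
          simp
        rw [hpadF]
        simp

def keepC (c : Char) : Bool := PySem.Chars.isalnum c || ['-','_','.'].contains c

theorem keepC_iff (c : Char) : keepC c = true ↔ (PySem.Chars.isalnum c = true ∨ c = '-' ∨ c = '_' ∨ c = '.') := by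
  rw [keepC]
  simp only [List.contains_eq_mem, List.mem_cons, List.not_mem_nil, or_false, Bool.decide_or,
    Bool.or_eq_true, decide_eq_true_eq]

def bstep (acc : List Char) (c : Char) : List Char :=
  if PySem.Chars.isalnum c || c = '-' || c = '_' then acc ++ [c]
  else if c = '.' then
    if acc ≠ [] ∧ acc.getLast? ≠ some '.' then acc ++ ['.'] else acc
  else acc

theorem bstep_noop (acc : List Char) (c : Char) (h : keepC c = false) : bstep acc c = acc := by
  have h' : ¬ (PySem.Chars.isalnum c = true ∨ c = '-' ∨ c = '_' ∨ c = '.') := by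
    rw [← keepC_iff, h]; simp
  rw [bstep, if_neg, if_neg]
  · exact fun hc => h' (Or.inr (Or.inr (Or.inr hc)))
  · intro hcond
    rcases Bool.or_eq_true_iff.mp hcond with h1 | h1
    · rcases Bool.or_eq_true_iff.mp h1 with h2 | h2
      · exact h' (Or.inl h2)
      · exact h' (Or.inr (Or.inl (by simpa using h2)))
    · exact h' (Or.inr (Or.inr (Or.inl (by simpa using h1))))

theorem body_loop (t : List Char) : ∀ acc,
    t.foldl bstep acc = acc ++ Dfa (decide (acc ≠ [] ∧ acc.getLast? ≠ some '.')) (t.filter keepC) := by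
  induction t with
  | nil => simp [Dfa]
  | cons c t ih =>
    intro acc
    rw [List.foldl_cons]
    by_cases hk : keepC c = true
    · by_cases hc : c = '.'
      · subst hc
        have hf : ('.' :: t).filter keepC = '.' :: t.filter keepC := by
          simp [List.filter_cons, show keepC '.' = true by decide]
        rw [hf]
        have hb : bstep acc '.' = if acc ≠ [] ∧ acc.getLast? ≠ some '.' then acc ++ ['.'] else acc := by
          rw [bstep, if_neg (by decide), if_pos rfl]
        by_cases hst : acc ≠ [] ∧ acc.getLast? ≠ some '.'
        · rw [hb, if_pos hst, ih]
          have h1 : (decide ((acc ++ ['.']) ≠ [] ∧ (acc ++ ['.']).getLast? ≠ some '.')) = false := by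
            simp [List.getLast?_concat]
          rw [h1]
          have h2 : (decide (acc ≠ [] ∧ acc.getLast? ≠ some '.')) = true := by simpa using hst
          rw [h2]
          have hD : Dfa true ('.' :: t.filter keepC) = '.' :: Dfa false (t.filter keepC) := by
            simp [Dfa]
          rw [hD]; simp
        · rw [hb, if_neg hst, ih]
          have h2 : (decide (acc ≠ [] ∧ acc.getLast? ≠ some '.')) = false := by
            simpa using hst
          rw [h2]
          have hD : Dfa false ('.' :: t.filter keepC) = Dfa false (t.filter keepC) := by
            simp [Dfa]
          rw [hD]
      · have hcond : (PySem.Chars.isalnum c || decide (c = '-') || decide (c = '_')) = true := by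
          rcases (keepC_iff c).mp hk with h | h | h | h
          · simp [h]
          · simp [h]
          · simp [h]
          · exact absurd h hc
        have hb : bstep acc c = acc ++ [c] := by rw [bstep, if_pos hcond]
        rw [hb, ih]
        have hst : (decide (acc ++ [c] ≠ [] ∧ (acc ++ [c]).getLast? ≠ some '.')) = true := by
          simp [List.getLast?_concat, hc]
        rw [hst]
        have hf : (c :: t).filter keepC = c :: t.filter keepC := by
          simp [List.filter_cons, hk]
        rw [hf]
        have hD : Dfa (decide (acc ≠ [] ∧ acc.getLast? ≠ some '.')) (c :: t.filter keepC)
            = c :: Dfa true (t.filter keepC) := by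
          simp [Dfa, hc]
        rw [hD]
        simp
    · rw [bstep_noop acc c (Bool.eq_false_iff.mpr hk)]
      have hf : (c :: t).filter keepC = t.filter keepC := by
        simp [List.filter_cons, Bool.eq_false_iff.mpr hk]
      rw [hf]
      exact ih acc


theorem dropWhile_eq_self_of_head (p : Char → Bool) (l : List Char)
    (h : ∀ a, l.head? = some a → p a = false) : l.dropWhile p = l := by
  cases l with
  | nil => rfl
  | cons a l => rw [List.dropWhile_cons, if_neg (by rw [h a rfl]; simp)]

theorem rstripDot_eq_self (l : List Char) (h : l.getLast? ≠ some '.') : rstripDot l = l := by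
  rw [rstripDot, dropWhile_eq_self_of_head, List.reverse_reverse]
  intro a ha
  rw [List.head?_reverse] at ha
  simp only [beq_eq_false_iff_ne, ne_eq]
  intro hc; rw [hc] at ha; exact h ha

theorem rstripDot_append_dot (l : List Char) (h : l.getLast? ≠ some '.') :
    rstripDot (l ++ ['.']) = l := by
  rw [rstripDot, List.reverse_append]
  have h1 : (['.'].reverse ++ l.reverse) = '.' :: l.reverse := by simp
  rw [h1, List.dropWhile_cons, if_pos (by simp)]
  rw [dropWhile_eq_self_of_head, List.reverse_reverse]
  intro a ha
  rw [List.head?_reverse] at ha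
  simp only [beq_eq_false_iff_ne, ne_eq]
  intro hc; rw [hc] at ha; exact h ha

theorem intercalate_nil_flatten (xs : List (List Char)) : List.intercalate [] xs = xs.flatten := by
  induction xs with
  | nil => simp [List.intercalate]
  | cons x xs ih =>
    cases xs with
    | nil => simp [List.intercalate]
    | cons y ys =>
      have h2 : List.intercalate ([]:List Char) (x::y::ys) = x ++ [] ++ List.intercalate [] (y::ys) := by
        simp [List.intercalate, List.intersperse]
      rw [h2, ih]; simp

theorem intercalate_head (ps : List (List Char)) (h2 : ∀ p ∈ ps, p ≠ [] ∧ '.' ∉ p) :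
    (List.intercalate ['.'] ps).head? ≠ some '.' := by
  cases ps with
  | nil => simp [List.intercalate]
  | cons p qs =>
    rw [intercalate_cons_dotflat]
    obtain ⟨hne, hnd⟩ := h2 p (by simp)
    cases p with
    | nil => exact absurd rfl hne
    | cons a l =>
      simp only [List.cons_append, List.head?_cons]
      intro hcon
      have : a = '.' := by simpa using hcon
      exact hnd (by simp [this])

theorem stripChars_NC (t : List Char) :
    PySem.Chars.stripChars (dotflat (partsOf t)) ['.'] = NC t := by
  rw [dotflat_eq]
  by_cases hP : partsOf t = []
  · rw [if_pos hP]
    simp [PySem.Chars.stripChars, NC, hP, List.intercalate]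
  · rw [if_neg hP]
    have hh := intercalate_head (partsOf t) (partsOf_prop t)
    have hl := intercalate_last (partsOf t) (partsOf_prop t)
    rw [PySem.Chars.stripChars]
    have hcontains : ∀ a : Char, a ≠ '.' → ((['.'] : List Char).contains a) = false := by
      intro a ha; simpa using ha
    have h1 : List.dropWhile (fun c => (['.'] : List Char).contains c)
        ('.' :: List.intercalate ['.'] (partsOf t)) = List.intercalate ['.'] (partsOf t) := by
      rw [List.dropWhile_cons, if_pos (by simp)]
      apply dropWhile_eq_self_of_head
      intro a ha
      apply hcontains
      intro hc; rw [hc] at ha; exact hh ha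
    rw [h1]
    rw [dropWhile_eq_self_of_head, List.reverse_reverse, NC]
    intro a ha
    rw [List.head?_reverse] at ha
    apply hcontains
    intro hc; rw [hc] at ha; exact hl ha

theorem core_eq (l : List Char) :
    PySem.Chars.stripChars (PySem.Chars.join []
      (((PySem.Chars.splitOn (l.filter keepC) ['.']).filter (fun d => d ≠ [])).map (fun d => '.' :: d))) ['.']
    = rstripDot (l.foldl bstep []) := by
  rw [splitOn_eq]
  have hfilter : ((mySplit (l.filter keepC)).1 :: (mySplit (l.filter keepC)).2).filter (fun d => d ≠ [])
      = partsOf (l.filter keepC) := rfl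
  rw [hfilter]
  have hjoin : PySem.Chars.join [] ((partsOf (l.filter keepC)).map (fun d => '.' :: d))
      = dotflat (partsOf (l.filter keepC)) := by
    rw [PySem.Chars.join, intercalate_nil_flatten, dotflat]
  rw [hjoin, stripChars_NC, body_loop]
  have hd : (decide (([]:List Char) ≠ [] ∧ ([]:List Char).getLast? ≠ some '.')) = false := by simp
  rw [hd, List.nil_append, (Dfa_spec (l.filter keepC)).2, padF]
  by_cases h : NC (l.filter keepC) ≠ [] ∧ (l.filter keepC).getLast? = some '.'
  · rw [if_pos h, rstripDot_append_dot _ (NC_last _)]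
  · rw [if_neg h, List.append_nil, rstripDot_eq_self _ (NC_last _)]

theorem pad_eq (z : List Char) :
    (if (if z.length = 1 then z ++ [PySem.List.pyGetD z (-1) 'a'] ++ [PySem.List.pyGetD z (-1) 'a'] else z).length = 2
     then (if z.length = 1 then z ++ [PySem.List.pyGetD z (-1) 'a'] ++ [PySem.List.pyGetD z (-1) 'a'] else z)
          ++ [PySem.List.pyGetD (if z.length = 1 then z ++ [PySem.List.pyGetD z (-1) 'a'] ++ [PySem.List.pyGetD z (-1) 'a'] else z) (-1) 'a']
     else (if z.length = 1 then z ++ [PySem.List.pyGetD z (-1) 'a'] ++ [PySem.List.pyGetD z (-1) 'a'] else z))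
  = (if z.length = 1 then z ++ z ++ z
     else if z.length = 2 then z ++ [PySem.List.pyGetD z (-1) 'a'] else z) := by
  match z with
  | [] => rfl
  | [a] => rfl
  | [a,b] => rfl
  | a::b::c::t =>
    have h1 : (a::b::c::t).length ≠ 1 := by simp
    have h2 : (a::b::c::t).length ≠ 2 := by simp
    simp only [if_neg h1, if_neg h2]


def tailA (y : List Char) : List Char :=
  let s5 := if y = [] then ['a'] else y
  let s6 := PySem.List.slice s5 none (some 15)
  let s7 := rstripDot s6
  let s8 := if s7.length = 1 then s7 ++ [PySem.List.pyGetD s7 (-1) 'a'] ++ [PySem.List.pyGetD s7 (-1) 'a'] else s7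
  if s8.length = 2 then s8 ++ [PySem.List.pyGetD s8 (-1) 'a'] else s8

def tailB (y : List Char) : List Char :=
  let t2 := if y = [] then ['a'] else y
  let t3 := PySem.List.slice t2 none (some 15)
  let t4 := rstripDot t3
  if t4.length = 1 then t4 ++ t4 ++ t4
  else if t4.length = 2 then t4 ++ [PySem.List.pyGetD t4 (-1) 'a'] else t4

theorem tail_eq (y : List Char) : tailA y = tailB y := by
  simp only [tailA, tailB]
  generalize rstripDot (PySem.List.slice (if y = [] then ['a'] else y) none (some 15)) = z
  exact pad_eq z

theorem loop_map (l : List Char) :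
    l.foldl (fun acc ch => bstep acc (PySem.Chars.lowerChar ch)) []
      = (l.map PySem.Chars.lowerChar).foldl bstep [] := by
  rw [List.foldl_map]

theorem sol_eq (s : String) : solution s = solution_alt s := by
  have hA : solution s = String.ofList (tailA (PySem.Chars.stripChars (PySem.Chars.join []
      ((((PySem.Chars.splitOn ((s.toList.map PySem.Chars.lowerChar).filter keepC) ['.'])).filter
        (fun d => d ≠ [])).map (fun d => '.' :: d))) ['.'])) := rfl
  have hB : solution_alt s = String.ofList (tailB (rstripDot
      (s.toList.foldl (fun acc ch => bstep acc (PySem.Chars.lowerChar ch)) []))) := rfl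
  rw [hA, hB, core_eq, loop_map, tail_eq]

-- ===== VERDICT (by name: the statement is the Claim_ definition above) =====
theorem solution_spec : Claim_equal_solution := by
  intro s _
  exact sol_eq s
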